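-- pv_equiv track=rewrite | github.com/nanoAgentTeam/nano_agent_team_selfevolve_20260315_235219 | backend/tools/web_reader.py | _detect_binary_suffix
-- ===== SOURCE A (Python) =====
-- _BINARY_CONTENT_TYPES = {
--     "application/pdf": ".pdf",
--     "application/vnd.openxmlformats-officedocument.wordprocessingml.document": ".docx",
--     "application/vnd.openxmlformats-officedocument.presentationml.presentation": ".pptx",
--     "application/vnd.openxmlformats-officedocument.spreadsheetml.sheet": ".xlsx",
--     "application/msword": ".doc",
-- }
--
-- def _detect_binary_suffix(content_type: str, url: str) -> str | None:
--     """Return file suffix if content is a binary document, else None."""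
--     ct_lower = content_type.lower().split(";")[0].strip()
--     if ct_lower in _BINARY_CONTENT_TYPES:
--         return _BINARY_CONTENT_TYPES[ct_lower]
--     url_lower = url.lower().split("?")[0]
--     for suffix in (".pdf", ".docx", ".pptx", ".xlsx", ".doc"):
--         if url_lower.endswith(suffix):
--             return suffix
--     return None
-- ===== SOURCE B (Python) =====
-- _BINARY_CONTENT_TYPES = {
--     "application/pdf": ".pdf",
--     "application/vnd.openxmlformats-officedocument.wordprocessingml.document": ".docx",
--     "application/vnd.openxmlformats-officedocument.presentationml.presentation": ".pptx",
--     "application/vnd.openxmlformats-officedocument.spreadsheetml.sheet": ".xlsx",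
--     "application/msword": ".doc",
-- }
--
-- _BINARY_SUFFIXES = {".pdf", ".docx", ".pptx", ".xlsx", ".doc"}
--
--
-- def _detect_binary_suffix(content_type: str, url: str) -> str | None:
--     """Return file suffix if content is a binary document, else None."""
--     ct_lower = content_type.lower().split(";")[0].strip()
--     suffix = _BINARY_CONTENT_TYPES.get(ct_lower)
--     if suffix is not None:
--         return suffix
--     path = url.lower().split("?")[0]
--     dot = path.rfind(".")
--     if dot == -1:
--         return None
--     ext = path[dot:]
--     return ext if ext in _BINARY_SUFFIXES else None
-- ===== Notes on version B (the rewrite author's own statement) =====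
-- stated objective: simpler
-- what changed: URL branch: instead of scanning five candidate suffixes with endswith, B extracts the trailing extension once via rfind('.') and slicing and does a single membership test in a set of the five binary suffixes; the content-type branch uses dict.get instead of 'in' + indexing.
import Mathlib
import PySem

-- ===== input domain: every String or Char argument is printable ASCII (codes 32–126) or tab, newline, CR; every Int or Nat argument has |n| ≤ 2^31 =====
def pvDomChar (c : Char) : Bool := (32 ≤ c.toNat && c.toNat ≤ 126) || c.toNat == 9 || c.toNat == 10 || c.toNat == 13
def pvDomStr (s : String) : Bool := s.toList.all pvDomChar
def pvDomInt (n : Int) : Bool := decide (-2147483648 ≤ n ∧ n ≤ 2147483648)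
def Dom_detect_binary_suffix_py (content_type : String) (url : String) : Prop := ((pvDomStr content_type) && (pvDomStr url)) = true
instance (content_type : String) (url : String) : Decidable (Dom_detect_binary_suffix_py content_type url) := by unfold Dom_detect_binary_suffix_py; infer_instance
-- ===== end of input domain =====

-- B replaces A's per-suffix endswith scan of the URL by extracting the trailing extension once
-- (rfind('.') + slice) and a single set-membership test (objective: simpler).

-- ===== PORT A =====
-- module constant _BINARY_CONTENT_TYPES
def pvBinCT : PySem.Dict String String :=
  ((((PySem.Dict.empty.insert "application/pdf" ".pdf").insert
      "application/vnd.openxmlformats-officedocument.wordprocessingml.document" ".docx").insert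
      "application/vnd.openxmlformats-officedocument.presentationml.presentation" ".pptx").insert
      "application/vnd.openxmlformats-officedocument.spreadsheetml.sheet" ".xlsx").insert
      "application/msword" ".doc"

-- the for-loop over the suffix tuple, with its early return
def pvASuffixLoop (url_lower : String) : List String → Option String
  | [] => none
  | s :: rest => if PySem.Str.endswith url_lower s then some s else pvASuffixLoop url_lower rest

def detect_binary_suffix_py (content_type : String) (url : String) : Option String :=
  let ct_lower := PySem.Str.strip
    (((PySem.Str.split? (PySem.Str.lower content_type) ";").getD []).headD "")
  if pvBinCT.contains ct_lower then some (pvBinCT.getD ct_lower "")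
  else
    let url_lower := ((PySem.Str.split? (PySem.Str.lower url) "?").getD []).headD ""
    pvASuffixLoop url_lower [".pdf", ".docx", ".pptx", ".xlsx", ".doc"]

-- ===== PORT B =====
-- module constant _BINARY_SUFFIXES (a Python set)
def pvBinSuffixSet : PySem.Set String := PySem.Set.ofList [".pdf", ".docx", ".pptx", ".xlsx", ".doc"]

def detect_binary_suffix_py_alt (content_type : String) (url : String) : Option String :=
  let ct_lower := PySem.Str.strip
    (((PySem.Str.split? (PySem.Str.lower content_type) ";").getD []).headD "")
  match pvBinCT.get? ct_lower with
  | some suffix => some suffix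
  | none =>
    let path := ((PySem.Str.split? (PySem.Str.lower url) "?").getD []).headD ""
    let dot := PySem.Str.rfind path "."
    if dot = -1 then none
    else
      let ext := PySem.Str.slice path (some dot) none
      if pvBinSuffixSet.contains ext then some ext else none

-- ===== PRECONDITION & SPEC =====
def Spec_detect_binary_suffix_py (content_type : String) (url : String) (out : Option String) : Prop := out = detect_binary_suffix_py_alt content_type url
instance (content_type : String) (url : String) (out : Option String) : Decidable (Spec_detect_binary_suffix_py content_type url out) := by unfold Spec_detect_binary_suffix_py; infer_instance

-- ===== CLAIM (what is proved, stated in full; the proofs are below) =====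
def Claim_equal_detect_binary_suffix_py : Prop := ∀ (content_type : String) (url : String), Dom_detect_binary_suffix_py content_type url → Spec_detect_binary_suffix_py content_type url (detect_binary_suffix_py content_type url)

-- ===== LEMMAS AND PROOFS =====

theorem pvContains_eq_isSome {κ ν : Type} [BEq κ] (d : PySem.Dict κ ν) (k : κ) :
    d.contains k = (d.get? k).isSome := by
  simp [PySem.Dict.contains, PySem.Dict.get?]
  exact Eq.symm List.isSome_find?

theorem pvGoZero (s sub : List Char) : PySem.Chars.rfind.go s sub 0 = if sub.isPrefixOf s then 0 else -1 := rfl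
theorem pvGoSucc (s sub : List Char) (j : Nat) :
    PySem.Chars.rfind.go s sub (j+1) = if sub.isPrefixOf (List.drop (j+1) s) then ((j:Int)+1) else PySem.Chars.rfind.go s sub j := rfl

theorem pvPrefixSingletonB (c : Char) (l : List Char) : List.isPrefixOf [c] l = (l.head? == some c) := by
  cases l with
  | nil => simp
  | cons x xs => simp [List.isPrefixOf, BEq.comm]

theorem pvGoAppend (ds : List Char) (d a : Char) :
    ∀ j, j < ds.length → PySem.Chars.rfind.go (ds ++ [d]) [a] j = PySem.Chars.rfind.go ds [a] j := by
  intro j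
  induction j with
  | zero =>
    intro h
    rw [pvGoZero, pvGoZero, pvPrefixSingletonB, pvPrefixSingletonB]
    cases ds with
    | nil => simp at h
    | cons x xs => simp
  | succ j ih =>
    intro h
    have hne : List.drop (j+1) ds ≠ [] := by
      intro hnil
      have : ds.length - (j+1) = 0 := by rw [← List.length_drop, hnil]; rfl
      omega
    have hdrop : List.drop (j+1) (ds ++ [d]) = List.drop (j+1) ds ++ [d] := by
      rw [List.drop_append_of_le_length (by omega)]
    have hhead : (List.drop (j+1) ds ++ [d]).head? = (List.drop (j+1) ds).head? := by
      cases hD : List.drop (j+1) ds with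
      | nil => exact absurd hD hne
      | cons y ys => simp
    rw [pvGoSucc, pvGoSucc, pvPrefixSingletonB, pvPrefixSingletonB, hdrop, hhead, ih (by omega)]

theorem pvRfindAppend (ds : List Char) (d a : Char) :
    PySem.Chars.rfind (ds ++ [d]) [a] = if d = a then (ds.length : Int) else PySem.Chars.rfind ds [a] := by
  have hlen : (ds ++ [d]).length = ds.length + 1 := by simp
  rw [PySem.Chars.rfind, hlen, pvGoSucc, List.drop_of_length_le (by simp)]
  rw [pvPrefixSingletonB]
  simp only [List.head?_nil, show ((none : Option Char) == some a) = false from rfl,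
    Bool.false_eq_true, if_false]
  cases hL : ds.length with
  | zero =>
    have hds : ds = [] := List.length_eq_zero_iff.mp hL
    subst hds
    rw [PySem.Chars.rfind]
    simp only [List.length_nil]
    rw [pvGoZero, pvPrefixSingletonB]
    simp only [List.nil_append, List.head?_cons, beq_iff_eq, Option.some.injEq,
      List.isPrefixOf, Bool.and_self]
    by_cases hda : d = a <;> simp [hda, eq_comm, pvGoZero]
  | succ k =>
    have hdropTop : List.drop (k+1) (ds ++ [d]) = [d] := by
      rw [List.drop_append_of_le_length (by omega), List.drop_of_length_le (by omega)]; rfl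
    rw [pvGoSucc, hdropTop, pvPrefixSingletonB]
    simp only [List.head?_cons, beq_iff_eq, Option.some.injEq]
    by_cases hda : d = a
    · rw [if_pos hda, if_pos hda]; norm_cast
    · rw [if_neg hda, if_neg hda]
      rw [pvGoAppend ds d a k (by omega)]
      rw [PySem.Chars.rfind, hL, pvGoSucc, List.drop_of_length_le (by omega), pvPrefixSingletonB]
      simp

theorem pvDotSpec (cs : List Char) :
    (PySem.Chars.rfind cs ['.'] = -1 ∧ '.' ∉ cs) ∨
    (∃ d : Nat, PySem.Chars.rfind cs ['.'] = (d : Int) ∧ d < cs.length ∧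
      cs.drop d = '.' :: (cs.reverse.takeWhile (· ≠ '.')).reverse) := by
  induction cs using List.reverseRecOn with
  | nil => left; exact ⟨rfl, by simp⟩
  | append_singleton ds c ih =>
    rw [pvRfindAppend]
    by_cases hc : c = '.'
    · right
      refine ⟨ds.length, by rw [if_pos hc], by simp, ?_⟩
      rw [List.drop_append_of_le_length le_rfl, List.drop_of_length_le le_rfl]
      subst hc
      simp [List.takeWhile_cons]
    · rw [if_neg hc]
      rcases ih with ⟨h1, h2⟩ | ⟨d, hd, hlt, hdrop⟩
      · left
        refine ⟨h1, ?_⟩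
        simp [h2, Ne.symm hc]
      · right
        refine ⟨d, hd, by simp; omega, ?_⟩
        rw [List.drop_append_of_le_length (by omega), hdrop]
        simp [List.takeWhile_cons, hc]

theorem pvSuffixIff (w cs : List Char) (hw : '.' ∉ w) :
    ('.' :: w) <:+ cs ↔ ('.' ∈ cs ∧ cs.reverse.takeWhile (· ≠ '.') = w.reverse) := by
  have hall : List.takeWhile (fun x => decide (x ≠ '.')) w.reverse = w.reverse :=
    List.takeWhile_eq_self_iff.mpr (by
      intro x hx
      simp only [decide_eq_true_eq]
      intro hxe; subst hxe; exact hw (List.mem_reverse.mp hx))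
  constructor
  · rintro ⟨t, rfl⟩
    refine ⟨by simp, ?_⟩
    rw [List.reverse_append, List.reverse_cons, List.append_assoc]
    show List.takeWhile (fun x => decide (x ≠ '.')) (w.reverse ++ ('.' :: t.reverse)) = w.reverse
    rw [List.takeWhile_append, if_pos (by rw [hall])]
    simp [List.takeWhile_cons]
  · rintro ⟨hmem, htw⟩
    have hsplit := List.takeWhile_append_dropWhile (p := fun c => decide (c ≠ '.')) (l := cs.reverse)
    have hdwne : cs.reverse.dropWhile (fun c => decide (c ≠ '.')) ≠ [] := by
      intro hnil
      rw [hnil, List.append_nil] at hsplit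
      have hmr : ('.' : Char) ∈ cs.reverse := List.mem_reverse.mpr hmem
      rw [← hsplit, htw] at hmr
      exact hw (List.mem_reverse.mp hmr)
    have hhd := List.head?_dropWhile_not (fun c => decide (c ≠ '.')) cs.reverse
    cases hD : cs.reverse.dropWhile (fun c => decide (c ≠ '.')) with
    | nil => exact absurd hD hdwne
    | cons x xs =>
      have hx : x = '.' := by
        rw [hD] at hhd
        simpa using hhd
      subst hx
      have hrev : cs.reverse = w.reverse ++ '.' :: xs := by
        rw [← hsplit, htw, hD]
      refine ⟨xs.reverse, ?_⟩
      have := congrArg List.reverse hrev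
      simpa using this.symm

theorem pvUrlBranch (p : String) :
    pvASuffixLoop p [".pdf", ".docx", ".pptx", ".xlsx", ".doc"] =
      (if PySem.Str.rfind p "." = -1 then none
       else
         let ext := PySem.Str.slice p (some (PySem.Str.rfind p ".")) none
         if pvBinSuffixSet.contains ext then some ext else none) := by
  have hdot : (".":String).toList = ['.'] := by decide
  have hrw : PySem.Str.rfind p "." = PySem.Chars.rfind p.toList ['.'] := by
    rw [PySem.Str.rfind_eq, hdot]
  rcases pvDotSpec p.toList with ⟨h1, h2⟩ | ⟨d, hd, hlt, hdropE⟩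
  · have hend : ∀ (w : List Char), '.' ∉ w →
        PySem.Chars.endswith p.toList ('.'::w) = false := by
      intro w hw
      rw [Bool.eq_false_iff]
      intro hc
      rw [PySem.Chars.endswith_iff] at hc
      exact h2 ((pvSuffixIff w _ hw).mp hc).1
    rw [if_pos (by rw [hrw]; exact h1)]
    simp [pvASuffixLoop,
      hend ['p','d','f'] (by decide),
      hend ['d','o','c','x'] (by decide),
      hend ['p','p','t','x'] (by decide),
      hend ['x','l','s','x'] (by decide),
      hend ['d','o','c'] (by decide)]
  · have hmem : ('.' : Char) ∈ p.toList := by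
      have h0 : ('.' : Char) ∈ p.toList.drop d := by rw [hdropE]; exact List.mem_cons_self
      have h3 := List.IsSuffix.subset (List.drop_suffix d p.toList)
      exact h3 h0
    rw [if_neg (by rw [hrw, hd]; omega)]
    have hslice : PySem.Str.slice p (some (PySem.Str.rfind p ".")) none =
        String.ofList ('.' :: (p.toList.reverse.takeWhile (· ≠ '.')).reverse) := by
      rw [hrw, hd, PySem.Str.slice, PySem.Chars.slice_eq_listSlice,
        PySem.List.slice_from _ (by positivity), Int.toNat_natCast, hdropE]
    set twr := (p.toList.reverse.takeWhile (· ≠ '.')).reverse with htwr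
    have hiff : ∀ (w : List Char), '.' ∉ w →
        PySem.Chars.endswith p.toList ('.'::w) = decide (twr = w) := by
      intro w hw
      rw [Bool.eq_iff_iff, PySem.Chars.endswith_iff, pvSuffixIff w _ hw, decide_eq_true_iff]
      constructor
      · rintro ⟨-, htk⟩; rw [htwr, htk]; exact List.reverse_reverse w
      · intro hr
        refine ⟨hmem, ?_⟩
        rw [htwr] at hr
        rw [← hr, List.reverse_reverse]
    have hset : pvBinSuffixSet = [".pdf", ".docx", ".pptx", ".xlsx", ".doc"] := by decide
    have c1 := hiff ['p','d','f'] (by decide)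
    have c2 := hiff ['d','o','c','x'] (by decide)
    have c3 := hiff ['p','p','t','x'] (by decide)
    have c4 := hiff ['x','l','s','x'] (by decide)
    have c5 := hiff ['d','o','c'] (by decide)
    have hof : ∀ (s : String) (w : List Char), s.toList = '.'::w →
        (String.ofList ('.' :: twr) = s ↔ twr = w) := by
      intro s w hs
      rw [← String.toList_inj, String.toList_ofList, hs]
      simp
    simp only [hslice, hset, PySem.Set.contains]
    by_cases e1 : twr = ['p','d','f'] <;>
      by_cases e2 : twr = ['d','o','c','x'] <;>
        by_cases e3 : twr = ['p','p','t','x'] <;>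
          by_cases e4 : twr = ['x','l','s','x'] <;>
            by_cases e5 : twr = ['d','o','c'] <;>
    simp_all [pvASuffixLoop, List.contains_eq_mem,
      (by decide : String.ofList ['.','p','d','f'] = ".pdf"),
      (by decide : String.ofList ['.','d','o','c','x'] = ".docx"),
      (by decide : String.ofList ['.','p','p','t','x'] = ".pptx"),
      (by decide : String.ofList ['.','x','l','s','x'] = ".xlsx"),
      (by decide : String.ofList ['.','d','o','c'] = ".doc"),
      ← String.toList_inj, String.toList_ofList]

-- ===== VERDICT (by name: the statement is the Claim_ definition above) =====
theorem detect_binary_suffix_py_spec : Claim_equal_detect_binary_suffix_py := by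
  intro content_type url _
  unfold Spec_detect_binary_suffix_py detect_binary_suffix_py detect_binary_suffix_py_alt
  dsimp only
  rw [pvContains_eq_isSome]
  cases h : pvBinCT.get? (PySem.Str.strip
      (((PySem.Str.split? (PySem.Str.lower content_type) ";").getD []).headD "")) with
  | some v =>
    simp only [PySem.Dict.getD, h, Option.isSome_some, if_pos, Option.getD_some]
  | none =>
    simp only [h, Option.isSome_none, Bool.false_eq_true, if_false]
    exact pvUrlBranch _
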